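-- pv_equiv track=rewrite | github.com/rakib034/ResumeBot | app.py | categorize_elements
-- ===== SOURCE A (Python) =====
-- def categorize_elements(editable_elements):
--     """Categorize elements for better organization"""
--     categories = {
--         'Personal Info': [],
--         'Professional Summary': [],
--         'Experience': [],
--         'Education': [],
--         'Skills': [],
--         'Other': []
--     }
--
--     for i, element_info in enumerate(editable_elements):
--         label = element_info['label'].lower()
--
--         if any(keyword in label for keyword in ['name', 'email', 'phone', 'location', 'contact']):
--             categories['Personal Info'].append((i, element_info))
--         elif any(keyword in label for keyword in ['summary', 'objective', 'about']):
--             categories['Professional Summary'].append((i, element_info))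
--         elif any(keyword in label for keyword in ['experience', 'work', 'job', 'position']):
--             categories['Experience'].append((i, element_info))
--         elif any(keyword in label for keyword in ['education', 'degree', 'university', 'school']):
--             categories['Education'].append((i, element_info))
--         elif any(keyword in label for keyword in ['skill', 'technology', 'tool']):
--             categories['Skills'].append((i, element_info))
--         else:
--             categories['Other'].append((i, element_info))
--
--     return categories
-- ===== SOURCE B (Python) =====
-- CATEGORY_KEYWORDS = [
--     ('Personal Info', ['name', 'email', 'phone', 'location', 'contact']),
--     ('Professional Summary', ['summary', 'objective', 'about']),
--     ('Experience', ['experience', 'work', 'job', 'position']),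
--     ('Education', ['education', 'degree', 'university', 'school']),
--     ('Skills', ['skill', 'technology', 'tool']),
-- ]
--
--
-- def _category_of(element_info):
--     label = element_info['label'].lower()
--     for name, keywords in CATEGORY_KEYWORDS:
--         if any(k in label for k in keywords):
--             return name
--     return 'Other'
--
--
-- def categorize_elements(editable_elements):
--     names = [name for name, _ in CATEGORY_KEYWORDS] + ['Other']
--     return {name: [(i, e) for i, e in enumerate(editable_elements)
--                    if _category_of(e) == name]
--             for name in names}
-- ===== Notes on version B (the rewrite author's own statement) =====
-- stated objective: alternative
-- what changed: Replaced the single pass that mutates a pre-built dict through a six-way elif chain by a keyword table plus a dict comprehension that builds each category's list with its own filtering pass over the elements.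
import Mathlib
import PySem

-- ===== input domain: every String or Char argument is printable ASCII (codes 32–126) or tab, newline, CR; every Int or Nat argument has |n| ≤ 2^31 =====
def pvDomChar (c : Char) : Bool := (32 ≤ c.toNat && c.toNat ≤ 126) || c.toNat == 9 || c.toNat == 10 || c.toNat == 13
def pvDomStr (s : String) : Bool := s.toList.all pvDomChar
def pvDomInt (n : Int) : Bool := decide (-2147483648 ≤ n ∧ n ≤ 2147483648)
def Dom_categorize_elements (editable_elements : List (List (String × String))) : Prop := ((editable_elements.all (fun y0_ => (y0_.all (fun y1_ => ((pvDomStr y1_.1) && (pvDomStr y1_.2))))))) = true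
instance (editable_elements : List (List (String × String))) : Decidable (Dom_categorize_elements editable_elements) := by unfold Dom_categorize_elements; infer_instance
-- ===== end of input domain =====

-- B replaces A's single-pass dict mutation through an elif chain by a keyword table and
-- one filtering pass per category; same results (alternative decomposition, not faster).


-- ===== PORT A =====
-- element_info['label'] : first-match lookup in the association list (dict convention)
def pvLabelLower (element_info : List (String × String)) : String :=
  PySem.Str.lower ((List.lookup "label" element_info).getD "")

-- any(keyword in label for keyword in kws)  (the construct both Pythons use)
def pvMatches (label : String) (kws : List String) : Bool :=
  kws.any (fun k => PySem.Str.isIn k label)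

def categorize_elements (editable_elements : List (List (String × String))) : List (String × List (Int × (List (String × String)))) :=
  let categories : PySem.Dict String (List (Int × (List (String × String)))) :=
    PySem.Dict.ofList [("Personal Info", []), ("Professional Summary", []),
      ("Experience", []), ("Education", []), ("Skills", []), ("Other", [])]
  let categories := (PySem.List.enumerate editable_elements).foldl (fun cats p =>
    let label := pvLabelLower p.2
    if pvMatches label ["name", "email", "phone", "location", "contact"] then
      cats.modify "Personal Info" [] (fun v => v ++ [p])
    else if pvMatches label ["summary", "objective", "about"] then
      cats.modify "Professional Summary" [] (fun v => v ++ [p])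
    else if pvMatches label ["experience", "work", "job", "position"] then
      cats.modify "Experience" [] (fun v => v ++ [p])
    else if pvMatches label ["education", "degree", "university", "school"] then
      cats.modify "Education" [] (fun v => v ++ [p])
    else if pvMatches label ["skill", "technology", "tool"] then
      cats.modify "Skills" [] (fun v => v ++ [p])
    else
      cats.modify "Other" [] (fun v => v ++ [p])) categories
  categories.items

-- ===== PORT B =====
def pvCategoryKeywords : List (String × List String) :=
  [("Personal Info", ["name", "email", "phone", "location", "contact"]),
   ("Professional Summary", ["summary", "objective", "about"]),
   ("Experience", ["experience", "work", "job", "position"]),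
   ("Education", ["education", "degree", "university", "school"]),
   ("Skills", ["skill", "technology", "tool"])]

def pvCategoryOf (element_info : List (String × String)) : String :=
  let label := pvLabelLower element_info
  match pvCategoryKeywords.find? (fun c => pvMatches label c.2) with
  | some c => c.1
  | none => "Other"

def categorize_elements_alt (editable_elements : List (List (String × String))) : List (String × List (Int × (List (String × String)))) :=
  let names := pvCategoryKeywords.map (fun c => c.1) ++ ["Other"]
  names.map (fun name =>
    (name, (PySem.List.enumerate editable_elements).filter (fun p => pvCategoryOf p.2 == name)))

-- ===== PRECONDITION & SPEC =====
-- Pre_ excludes elements without a 'label' key, on which the Python A raises KeyError.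
def Pre_categorize_elements (editable_elements : List (List (String × String))) : Prop :=
  (editable_elements.all (fun ei => (List.lookup "label" ei).isSome)) = true
instance (editable_elements : List (List (String × String))) : Decidable (Pre_categorize_elements editable_elements) := by unfold Pre_categorize_elements; infer_instance

def pvWitness_categorize_elements : (List (List (String × String))) :=
  [[("label", "Work Email")], [("label", "hobbies")]]

def Spec_categorize_elements (editable_elements : List (List (String × String))) (out : List (String × List (Int × (List (String × String))))) : Prop := out = categorize_elements_alt editable_elements
instance (editable_elements : List (List (String × String))) (out : List (String × List (Int × (List (String × String))))) : Decidable (Spec_categorize_elements editable_elements out) := by unfold Spec_categorize_elements; infer_instance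

-- ===== CLAIM (what is proved, stated in full; the proofs are below) =====
def Claim_equal_categorize_elements : Prop := ∀ (editable_elements : List (List (String × String))), Dom_categorize_elements editable_elements → Pre_categorize_elements editable_elements → Spec_categorize_elements editable_elements (categorize_elements editable_elements)

-- ===== LEMMAS AND PROOFS =====
def pvNames : List String :=
  ["Personal Info", "Professional Summary", "Experience", "Education", "Skills", "Other"]

def pvInit : PySem.Dict String (List (Int × (List (String × String)))) :=
  PySem.Dict.ofList [("Personal Info", []), ("Professional Summary", []),
    ("Experience", []), ("Education", []), ("Skills", []), ("Other", [])]

theorem pvCategoryOf_mem (e : List (String × String)) : pvCategoryOf e ∈ pvNames := by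
  simp only [pvCategoryOf]
  split
  · next c hc =>
    have hm := List.mem_of_find?_eq_some hc
    fin_cases hm <;> simp [pvNames]
  · simp [pvNames]

theorem pvStepA_eq (cats : PySem.Dict String (List (Int × (List (String × String)))))
    (p : Int × (List (String × String))) :
    (let label := pvLabelLower p.2
    if pvMatches label ["name", "email", "phone", "location", "contact"] then
      cats.modify "Personal Info" [] (fun v => v ++ [p])
    else if pvMatches label ["summary", "objective", "about"] then
      cats.modify "Professional Summary" [] (fun v => v ++ [p])
    else if pvMatches label ["experience", "work", "job", "position"] then
      cats.modify "Experience" [] (fun v => v ++ [p])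
    else if pvMatches label ["education", "degree", "university", "school"] then
      cats.modify "Education" [] (fun v => v ++ [p])
    else if pvMatches label ["skill", "technology", "tool"] then
      cats.modify "Skills" [] (fun v => v ++ [p])
    else
      cats.modify "Other" [] (fun v => v ++ [p]))
    = cats.modify (pvCategoryOf p.2) [] (fun v => v ++ [p]) := by
  cases h1 : pvMatches (pvLabelLower p.2) ["name", "email", "phone", "location", "contact"] <;>
  cases h2 : pvMatches (pvLabelLower p.2) ["summary", "objective", "about"] <;>
  cases h3 : pvMatches (pvLabelLower p.2) ["experience", "work", "job", "position"] <;>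
  cases h4 : pvMatches (pvLabelLower p.2) ["education", "degree", "university", "school"] <;>
  cases h5 : pvMatches (pvLabelLower p.2) ["skill", "technology", "tool"] <;>
    simp [pvCategoryOf, pvCategoryKeywords, List.find?, h1, h2, h3, h4, h5]

theorem pv_items_eq_keys_map (d : PySem.Dict String (List (Int × (List (String × String)))))
    (h : d.keys.Nodup) : d.items = d.keys.map (fun k => (k, d.getD k [])) := by
  simp only [PySem.Dict.keys] at *
  rw [List.map_map]
  conv_lhs => rw [← List.map_id d.items]
  apply List.map_congr_left
  rintro ⟨k, v⟩ hq
  have hg := PySem.Dict.get?_of_mem_items d hq h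
  simp [PySem.Dict.getD_of_get?_eq_some d [] hg]

-- ===== VERDICT (by name: the statement is the Claim_ definition above) =====
theorem pv_keys_fold (l : List (Int × (List (String × String)))) :
    (l.foldl (fun cats p => cats.modify (pvCategoryOf p.2) [] (fun v => v ++ [p])) pvInit).keys
      = PySem.Set.update pvInit.keys (l.map (fun p => pvCategoryOf p.2)) :=
  PySem.Dict.keys_foldl_modify_key l (fun p => pvCategoryOf p.2) [] (fun _ p v => v ++ [p]) pvInit

theorem pv_update_names (ks : List String) (h : ∀ k ∈ ks, k ∈ pvNames) :
    PySem.Set.update pvNames ks = pvNames := by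
  rw [PySem.Set.update_eq_append_filter]
  have hnil : List.filter (fun y => !PySem.Set.contains pvNames y) (PySem.Set.ofList ks) = [] := by
    apply List.filter_eq_nil_iff.mpr
    intro y hy
    have : y ∈ pvNames := h y ((PySem.Set.mem_ofList ks y).mp hy)
    simpa using this
  rw [hnil, List.append_nil]

theorem pv_getD_fold (l : List (Int × (List (String × String)))) (k : String) :
    (l.foldl (fun cats p => cats.modify (pvCategoryOf p.2) [] (fun v => v ++ [p])) pvInit).getD k []
      = pvInit.getD k [] ++ l.filter (fun p => pvCategoryOf p.2 == k) := by
  have h1 : (l.foldl (fun cats p => cats.modify (pvCategoryOf p.2) [] (fun v => v ++ [p])) pvInit)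
      = ((l.map (fun p => (pvCategoryOf p.2, p))).foldl
          (fun d q => d.modify q.1 [] (fun v => v ++ [q.2])) pvInit) := by
    simp only [List.foldl_map]
  rw [h1, PySem.Dict.getD_foldl_modify_append, List.filter_map]
  simp only [Function.comp_def, List.map_map]
  simp

-- ===== VERDICT (by name: the statement is the Claim_ definition above) =====
theorem categorize_elements_spec : Claim_equal_categorize_elements := by
  intro xs _ _
  unfold Spec_categorize_elements categorize_elements categorize_elements_alt
  have hstep : (fun (cats : PySem.Dict String (List (Int × (List (String × String)))))
      (p : Int × (List (String × String))) =>
      let label := pvLabelLower p.2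
      if pvMatches label ["name", "email", "phone", "location", "contact"] then
        cats.modify "Personal Info" [] (fun v => v ++ [p])
      else if pvMatches label ["summary", "objective", "about"] then
        cats.modify "Professional Summary" [] (fun v => v ++ [p])
      else if pvMatches label ["experience", "work", "job", "position"] then
        cats.modify "Experience" [] (fun v => v ++ [p])
      else if pvMatches label ["education", "degree", "university", "school"] then
        cats.modify "Education" [] (fun v => v ++ [p])
      else if pvMatches label ["skill", "technology", "tool"] then
        cats.modify "Skills" [] (fun v => v ++ [p])
      else
        cats.modify "Other" [] (fun v => v ++ [p]))
      = (fun cats p => cats.modify (pvCategoryOf p.2) [] (fun v => v ++ [p])) :=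
    funext fun cats => funext fun p => pvStepA_eq cats p
  show ((PySem.List.enumerate xs).foldl _ pvInit).items = _
  rw [hstep]
  set l := PySem.List.enumerate xs with hl
  set dF := l.foldl (fun cats p => cats.modify (pvCategoryOf p.2) [] (fun v => v ++ [p])) pvInit with hdF
  have hkeys : dF.keys = pvNames := by
    rw [hdF, pv_keys_fold]
    have : pvInit.keys = pvNames := by decide
    rw [this]
    apply pv_update_names
    intro k hk
    obtain ⟨p, _, rfl⟩ := List.mem_map.mp hk
    exact pvCategoryOf_mem p.2
  have hnodup : dF.keys.Nodup := by rw [hkeys]; decide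
  rw [pv_items_eq_keys_map dF hnodup, hkeys]
  have hnames : pvCategoryKeywords.map (fun c => c.1) ++ ["Other"] = pvNames := by decide
  rw [hnames]
  apply List.map_congr_left
  intro k hk
  have hget : dF.getD k [] = pvInit.getD k [] ++ l.filter (fun p => pvCategoryOf p.2 == k) := by
    rw [hdF]; exact pv_getD_fold l k
  have hinit : pvInit.getD k [] = [] := by fin_cases hk <;> decide
  rw [hget, hinit, List.nil_append]
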